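-- pv_equiv track=rewrite | github.com/Vibatious/Obsidian | Main/LeastSignificantRet.py | getnext
-- ===== SOURCE A (Python) =====
-- def getnext(list1,pos):
-- 	sum = 0
-- 	k = 7
-- 	for i in range(pos,pos+8):
-- 		if list1[i]=='1':
-- 			sum = sum+pow(2,k)
-- 		k = k-1
--
-- 	return chr(sum)
-- ===== SOURCE B (Python) =====
-- def getnext(list1, pos):
--     s = ''.join('1' if list1[i] == '1' else '0' for i in range(pos, pos + 8))
--     return chr(int(s, 2))
-- ===== Notes on version B (the rewrite author's own statement) =====
-- stated objective: idiomatic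
-- what changed: B builds the 8-character binary string by mapping each element to '1'/'0' and parses it once with int(s, 2), instead of accumulating powers of two with a decrementing exponent.
import Mathlib
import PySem

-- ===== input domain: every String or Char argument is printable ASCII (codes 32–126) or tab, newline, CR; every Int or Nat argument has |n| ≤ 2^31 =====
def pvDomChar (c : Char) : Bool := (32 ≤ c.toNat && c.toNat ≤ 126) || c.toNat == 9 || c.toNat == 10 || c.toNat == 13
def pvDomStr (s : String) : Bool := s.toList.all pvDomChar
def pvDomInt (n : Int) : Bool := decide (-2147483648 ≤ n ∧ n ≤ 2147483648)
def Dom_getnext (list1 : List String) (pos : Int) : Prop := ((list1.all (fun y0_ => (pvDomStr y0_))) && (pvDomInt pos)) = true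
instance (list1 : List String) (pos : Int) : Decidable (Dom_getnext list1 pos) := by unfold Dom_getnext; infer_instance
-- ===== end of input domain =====

-- B restages the computation: build the 8-char binary string first, then parse it once
-- in base 2 (objective: idiomatic); same return value wherever A returns.

-- ===== PORT A =====
-- A: accumulate sum += 2^k over i in range(pos, pos+8) with k decrementing from 7; chr(sum).
def getnext (list1 : List String) (pos : Int) : String :=
  let st := (PySem.List.pyRange pos (pos + 8) 1).foldl
    (fun (st : Int × Int) i =>
      let sum := if PySem.List.pyGetD list1 i "" = "1" then st.1 + 2 ^ st.2.toNat else st.1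
      (sum, st.2 - 1))
    ((0 : Int), (7 : Int))
  String.mk [Char.ofNat st.1.toNat]

-- ===== PORT B =====
-- B: map each position to '1'/'0', then parse the 8-char string in base 2; chr of that.
def getnext_alt (list1 : List String) (pos : Int) : String :=
  let s : List Char := (PySem.List.pyRange pos (pos + 8) 1).map
    (fun i => if PySem.List.pyGetD list1 i "" = "1" then '1' else '0')
  -- int(s, 2): base-2 parse of a string of '0'/'1' digits (exact here: s is only such digits)
  let n : Nat := s.foldl (fun acc c => 2 * acc + (if c = '1' then 1 else 0)) 0
  String.mk [Char.ofNat n]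

-- ===== PRECONDITION & SPEC =====
-- Pre_: every index pos..pos+7 is a valid (possibly negative) Python index; outside it A raises IndexError.
def Pre_getnext (list1 : List String) (pos : Int) : Prop :=
  -(list1.length : Int) ≤ pos ∧ pos + 7 < (list1.length : Int)
instance (list1 : List String) (pos : Int) : Decidable (Pre_getnext list1 pos) := by
  unfold Pre_getnext; infer_instance
def pvWitness_getnext : List String × Int := (["0", "1", "0", "0", "0", "0", "0", "1"], 0)

def Spec_getnext (list1 : List String) (pos : Int) (out : String) : Prop := out = getnext_alt list1 pos
instance (list1 : List String) (pos : Int) (out : String) : Decidable (Spec_getnext list1 pos out) := by unfold Spec_getnext; infer_instance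

-- ===== CLAIM (what is proved, stated in full; the proofs are below) =====
def Claim_equal_getnext : Prop := ∀ (list1 : List String) (pos : Int), Dom_getnext list1 pos → Pre_getnext list1 pos → Spec_getnext list1 pos (getnext list1 pos)

-- ===== LEMMAS AND PROOFS =====
theorem pyRange8 (pos : Int) : PySem.List.pyRange pos (pos + 8) 1 =
    [pos, pos + 1, pos + 2, pos + 3, pos + 4, pos + 5, pos + 6, pos + 7] := by
  rw [PySem.List.pyRange_one_cons (by omega), PySem.List.pyRange_one_cons (by omega),
      PySem.List.pyRange_one_cons (by omega), PySem.List.pyRange_one_cons (by omega),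
      PySem.List.pyRange_one_cons (by omega), PySem.List.pyRange_one_cons (by omega),
      PySem.List.pyRange_one_cons (by omega), PySem.List.pyRange_one_cons (by omega),
      PySem.List.pyRange_one_eq_nil (by omega)]
  norm_num
  omega

-- B's value (as a Nat): map indices to '1'/'0' chars, then Horner base-2 parse from n.
def pvVal (list1 : List String) (l : List Int) (n : Nat) : Nat :=
  (l.map (fun i => if PySem.List.pyGetD list1 i "" = "1" then '1' else '0')).foldl
    (fun acc c => 2 * acc + (if c = '1' then 1 else 0)) n

theorem pvVal_cons (list1 : List String) (i : Int) (l : List Int) (n : Nat) :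
    pvVal list1 (i :: l) n =
      pvVal list1 l (2 * n + (if PySem.List.pyGetD list1 i "" = "1" then 1 else 0)) := by
  simp only [pvVal, List.map_cons, List.foldl_cons]
  split_ifs <;> simp_all

theorem pvVal_shift (list1 : List String) (l : List Int) (n : Nat) :
    pvVal list1 l n = n * 2 ^ l.length + pvVal list1 l 0 := by
  induction l generalizing n with
  | nil => simp [pvVal]
  | cons i t ih =>
    rw [pvVal_cons, pvVal_cons, ih, ih (2 * 0 + _)]
    simp only [List.length_cons, pow_succ]
    split_ifs <;> ring

-- A's accumulating fold with k starting at length-1 equals s plus B's parse.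
theorem foldA_eq (list1 : List String) (l : List Int) (s k : Int)
    (hk : k = (l.length : Int) - 1) :
    (l.foldl (fun (st : Int × Int) i =>
        ((if PySem.List.pyGetD list1 i "" = "1" then st.1 + 2 ^ st.2.toNat else st.1),
          st.2 - 1)) (s, k)).1 = s + (pvVal list1 l 0 : Int) := by
  induction l generalizing s k with
  | nil => simp [pvVal, hk]
  | cons i t ih =>
    rw [List.foldl_cons]
    have hk' : k - 1 = (t.length : Int) - 1 := by simp [hk]
    have hkt : k.toNat = t.length := by omega
    rw [ih _ _ hk']
    rw [pvVal_cons, pvVal_shift list1 t (2 * 0 + _)]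
    split_ifs
    · simp [hkt]
      ring
    · simp

-- ===== VERDICT (by name: the statement is the Claim_ definition above) =====
theorem getnext_spec : Claim_equal_getnext := by
  intro list1 pos _ _
  show _ = _
  simp only [getnext, getnext_alt]
  rw [pyRange8]
  rw [foldA_eq list1 _ 0 7 (by norm_num)]
  have : ((0 : Int) + (pvVal list1 [pos, pos + 1, pos + 2, pos + 3, pos + 4, pos + 5, pos + 6, pos + 7] 0 : Int)).toNat
      = pvVal list1 [pos, pos + 1, pos + 2, pos + 3, pos + 4, pos + 5, pos + 6, pos + 7] 0 := by
    omega
  rw [this]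
  rfl
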